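-- pv_equiv track=rewrite | github.com/rozie/Polish-mobile-phone-generator | png.py | generate_N_letter_numbers
-- ===== SOURCE A (Python) =====
-- from itertools import product
--
-- def generate_N_letter_numbers(prefix, max_length):
--
--     digits = '0123456789'
--     results = []
--     remaining_length = max_length - len(prefix)
--     if remaining_length > 0:
--         for suffix in product(digits, repeat=remaining_length):
--             results.append(prefix + ''.join(suffix))
--     return results
-- ===== SOURCE B (Python) =====
-- def generate_N_letter_numbers(prefix, max_length):
--     remaining_length = max_length - len(prefix)
--     if remaining_length <= 0:
--         return []
--     fmt = '%0' + str(remaining_length) + 'd'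
--     return [prefix + fmt % i for i in range(10 ** remaining_length)]
-- ===== Notes on version B (the rewrite author's own statement) =====
-- stated objective: alternative
-- what changed: Replaces the itertools.product Cartesian-product enumeration with a single counter over range(10**remaining_length), formatting each counter value as a zero-padded fixed-width decimal suffix.
import Mathlib
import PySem

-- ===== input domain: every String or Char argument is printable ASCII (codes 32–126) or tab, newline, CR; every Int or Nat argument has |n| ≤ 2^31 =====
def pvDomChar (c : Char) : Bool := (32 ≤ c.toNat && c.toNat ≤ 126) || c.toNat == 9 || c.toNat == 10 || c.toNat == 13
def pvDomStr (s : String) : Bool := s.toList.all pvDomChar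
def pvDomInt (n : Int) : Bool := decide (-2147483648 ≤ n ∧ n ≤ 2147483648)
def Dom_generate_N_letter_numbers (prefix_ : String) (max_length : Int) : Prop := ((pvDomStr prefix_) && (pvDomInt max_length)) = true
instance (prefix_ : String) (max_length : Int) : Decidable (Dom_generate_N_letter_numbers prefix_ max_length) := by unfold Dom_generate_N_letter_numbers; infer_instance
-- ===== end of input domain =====

-- B replaces the Cartesian-product enumeration with a counter over range(10^r),
-- zero-pad-formatting each counter value (objective: alternative; same cost).


-- ===== PORT A =====
-- itertools.product('0123456789', repeat=r): leftmost position varies slowest.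
def prodDigits : Nat → List (List Char)
  | 0 => [[]]
  | r + 1 => "0123456789".toList.flatMap (fun d => (prodDigits r).map (fun s => d :: s))

def generate_N_letter_numbers (prefix_ : String) (max_length : Int) : List String :=
  let remaining_length : Int := max_length - (prefix_.toList.length : Int)
  if remaining_length > 0 then
    (prodDigits remaining_length.toNat).map (fun suffix => prefix_ ++ String.ofList suffix)
  else []

-- ===== PORT B =====
-- prefix + str(i).zfill(remaining_length) for i in range(10 ** remaining_length)
def generate_N_letter_numbers_alt (prefix_ : String) (max_length : Int) : List String :=
  let remaining_length : Int := max_length - (prefix_.toList.length : Int)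
  if remaining_length ≤ 0 then []
  else
    (List.range (10 ^ remaining_length.toNat)).map
      (fun (i : Nat) => prefix_ ++ PySem.Str.zfill (PySem.Int.toStr (i : Int)) remaining_length)

-- ===== PRECONDITION & SPEC =====
def Spec_generate_N_letter_numbers (prefix_ : String) (max_length : Int) (out : List String) : Prop := out = generate_N_letter_numbers_alt prefix_ max_length
instance (prefix_ : String) (max_length : Int) (out : List String) : Decidable (Spec_generate_N_letter_numbers prefix_ max_length out) := by unfold Spec_generate_N_letter_numbers; infer_instance

-- ===== CLAIM (what is proved, stated in full; the proofs are below) =====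
def Claim_equal_generate_N_letter_numbers : Prop := ∀ (prefix_ : String) (max_length : Int), Dom_generate_N_letter_numbers prefix_ max_length → Spec_generate_N_letter_numbers prefix_ max_length (generate_N_letter_numbers prefix_ max_length)

-- ===== LEMMAS AND PROOFS =====

-- width-r decimal digit list of n (most significant first), the mathematical middleman
def suffixOf : Nat → Nat → List Char
  | 0, _ => []
  | r + 1, n => suffixOf r (n / 10) ++ [Nat.digitChar (n % 10)]

-- the unpadded decimal digit list of n
def natDigits (n : Nat) : List Char :=
  if n < 10 then [Nat.digitChar n]
  else natDigits (n / 10) ++ [Nat.digitChar (n % 10)]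
decreasing_by exact Nat.div_lt_self (by omega) (by omega)

theorem suffixOf_split (r : Nat) : ∀ d j : Nat, d < 10 → j < 10 ^ r →
    suffixOf (r + 1) (d * 10 ^ r + j) = Nat.digitChar d :: suffixOf r j := by
  induction r with
  | zero =>
    intro d j hd hj
    interval_cases j
    simp [suffixOf, Nat.mod_eq_of_lt hd]
  | succ r ih =>
    intro d j hd hj
    have hmul : d * 10 ^ (r + 1) = 10 * (d * 10 ^ r) := by ring
    have h1 : (d * 10 ^ (r + 1) + j) / 10 = d * 10 ^ r + j / 10 := by
      rw [hmul, Nat.mul_add_div (by omega)]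
    have h2 : (d * 10 ^ (r + 1) + j) % 10 = j % 10 := by
      rw [hmul, Nat.mul_add_mod]
    have hj' : j / 10 < 10 ^ r := by
      apply Nat.div_lt_of_lt_mul
      rw [show (10:ℕ) * 10 ^ r = 10 ^ (r + 1) by ring]; exact hj
    calc suffixOf (r + 2) (d * 10 ^ (r + 1) + j)
        = suffixOf (r + 1) (d * 10 ^ r + j / 10) ++ [Nat.digitChar (j % 10)] := by
          simp [suffixOf, h1, h2]
      _ = (Nat.digitChar d :: suffixOf r (j / 10)) ++ [Nat.digitChar (j % 10)] := by
          rw [ih d (j / 10) hd hj']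
      _ = Nat.digitChar d :: suffixOf (r + 1) j := by simp [suffixOf]

theorem range_mul_flatMap (a b : Nat) :
    List.range (a * b) = (List.range a).flatMap (fun d => (List.range b).map (fun j => d * b + j)) := by
  induction a with
  | zero => simp
  | succ a ih =>
    rw [Nat.succ_mul, List.range_add, ih, List.range_succ, List.flatMap_append]
    simp [List.flatMap]

theorem digits_enum :
    "0123456789".toList = (List.range 10).map Nat.digitChar := by
  decide

theorem map_suffixOf_range (r : Nat) :
    (List.range (10 ^ r)).map (suffixOf r) = prodDigits r := by
  induction r with
  | zero => simp [prodDigits, suffixOf]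
  | succ r ih =>
    rw [show (10:ℕ) ^ (r + 1) = 10 * 10 ^ r by ring, range_mul_flatMap, List.map_flatMap, prodDigits]
    conv_rhs => rw [digits_enum]
    rw [List.flatMap_map]
    apply List.flatMap_congr
    intro d hd
    have hd10 : d < 10 := List.mem_range.mp hd
    rw [← ih, List.map_map, List.map_map]
    apply List.map_congr_left
    intro j hj
    exact suffixOf_split r d j hd10 (List.mem_range.mp hj)

theorem natDigits_ne_nil (n : Nat) : natDigits n ≠ [] := by
  rw [natDigits]
  split <;> simp

theorem natDigits_mem (n : Nat) : ∀ c ∈ natDigits n, ∃ d, d < 10 ∧ c = Nat.digitChar d := by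
  induction n using Nat.strong_induction_on with
  | _ n ih =>
    rw [natDigits]
    split
    · rename_i h
      intro c hc
      simp only [List.mem_singleton] at hc
      exact ⟨n, h, hc⟩
    · rename_i h
      intro c hc
      rcases List.mem_append.mp hc with h1 | h1
      · exact ih (n / 10) (Nat.div_lt_self (by omega) (by omega)) c h1
      · simp only [List.mem_singleton] at h1
        exact ⟨n % 10, Nat.mod_lt n (by omega), h1⟩

theorem natDigits_length_le (r : Nat) : ∀ n : Nat, n < 10 ^ (r + 1) → (natDigits n).length ≤ r + 1 := by
  induction r with
  | zero =>
    intro n hn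
    rw [natDigits, if_pos (by simpa using hn)]
    simp
  | succ r ih =>
    intro n hn
    rw [natDigits]
    split
    · simp
    · rename_i h
      have : n / 10 < 10 ^ (r + 1) := by
        apply Nat.div_lt_of_lt_mul
        rw [show (10:ℕ) * 10 ^ (r+1) = 10 ^ (r + 2) by ring]; exact hn
      simpa using ih (n / 10) this

theorem suffixOf_eq_pad (r : Nat) : ∀ n : Nat, n < 10 ^ (r + 1) →
    suffixOf (r + 1) n = List.replicate ((r + 1) - (natDigits n).length) '0' ++ natDigits n := by
  induction r with
  | zero =>
    intro n hn
    have hn10 : n < 10 := by simpa using hn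
    rw [natDigits, if_pos hn10]
    simp [suffixOf, Nat.mod_eq_of_lt hn10]
  | succ r ih =>
    intro n hn
    have hdiv : n / 10 < 10 ^ (r + 1) := by
      apply Nat.div_lt_of_lt_mul
      rw [show (10:ℕ) * 10 ^ (r+1) = 10 ^ (r + 2) by ring]; exact hn
    by_cases h10 : n < 10
    · have hd0 : n / 10 = 0 := Nat.div_eq_of_lt h10
      have hm : n % 10 = n := Nat.mod_eq_of_lt h10
      rw [show suffixOf (r + 2) n = suffixOf (r + 1) (n / 10) ++ [Nat.digitChar (n % 10)] from rfl]
      rw [hd0, hm, ih 0 (by positivity)]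
      conv_rhs => rw [natDigits, if_pos h10]
      have h0 : natDigits 0 = ['0'] := by rw [natDigits]; simp; rfl
      rw [h0]
      simp only [List.length_singleton]
      rw [show (r + 1) - 1 = r by omega, show (r + 2) - 1 = r + 1 by omega]
      rw [List.append_assoc, List.replicate_succ' (n := r)]
      simp
    · rw [show suffixOf (r + 2) n = suffixOf (r + 1) (n / 10) ++ [Nat.digitChar (n % 10)] from rfl]
      rw [ih (n / 10) hdiv]
      conv_rhs => rw [natDigits, if_neg h10]
      have hlen : (natDigits (n / 10) ++ [Nat.digitChar (n % 10)]).length = (natDigits (n / 10)).length + 1 := by simp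
      rw [hlen, List.append_assoc]
      congr 2
      omega

theorem zfill_natDigits (r : Nat) (n : Nat) (hn : n < 10 ^ (r + 1)) :
    PySem.Chars.zfill (natDigits n) ((r : Int) + 1) = suffixOf (r + 1) n := by
  have hne : natDigits n ≠ [] := natDigits_ne_nil n
  have hmem := natDigits_mem n
  have hlen := natDigits_length_le r n hn
  rw [suffixOf_eq_pad r n hn]
  unfold PySem.Chars.zfill
  by_cases hle : ((r : Int) + 1) ≤ ((natDigits n).length : Int)
  · rw [if_pos hle]
    have : (r + 1) - (natDigits n).length = 0 := by omega
    rw [this]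
    simp
  · rw [if_neg hle]
    obtain ⟨c, rest, hcs⟩ := List.exists_cons_of_ne_nil hne
    obtain ⟨d, hd, hcd⟩ : ∃ d, d < 10 ∧ c = Nat.digitChar d := by
      rw [hcs] at hmem; exact hmem c (by simp)
    have hcne : ¬ (c = '+' ∨ c = '-') := by
      subst hcd; interval_cases d <;> decide
    have htn : ((r : Int) + 1).toNat = r + 1 := by omega
    rw [hcs]
    simp only [hcne, if_false, htn, ← hcs]

theorem toDigitsCore_eq (fuel : Nat) : ∀ (n : Nat) (acc : List Char), n < fuel →
    Nat.toDigitsCore 10 fuel n acc = natDigits n ++ acc := by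
  induction fuel with
  | zero => intro n acc h; omega
  | succ fuel ih =>
    intro n acc h
    rw [Nat.toDigitsCore]
    by_cases h10 : n < 10
    · rw [if_pos (by omega : n / 10 = 0)]
      rw [natDigits, if_pos h10, Nat.mod_eq_of_lt h10]
      rfl
    · rw [if_neg (by omega : ¬ n / 10 = 0)]
      rw [ih (n / 10) _ (by omega)]
      conv_rhs => rw [natDigits, if_neg h10]
      simp

theorem toDigits_eq_natDigits (n : Nat) : Nat.toDigits 10 n = natDigits n := by
  rw [Nat.toDigits, toDigitsCore_eq (n + 1) n [] (by omega)]
  simp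

theorem toChars_natCast (i : Nat) : PySem.Int.toChars (i : Int) = Nat.toDigits 10 i := by
  unfold PySem.Int.toChars
  rw [if_neg (by omega)]
  simp

theorem zfill_toStr_eq_suffixOf (r : Nat) (i : Nat) (hi : i < 10 ^ (r + 1)) :
    PySem.Str.zfill (PySem.Int.toStr (i : Int)) ((r : Int) + 1) = String.ofList (suffixOf (r + 1) i) := by
  unfold PySem.Str.zfill
  congr 1
  rw [PySem.Int.toList_toStr, toChars_natCast, toDigits_eq_natDigits]
  exact zfill_natDigits r i hi

-- ===== VERDICT (by name: the statement is the Claim_ definition above) =====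
theorem generate_N_letter_numbers_spec : Claim_equal_generate_N_letter_numbers := by
  intro prefix_ max_length _
  unfold Spec_generate_N_letter_numbers generate_N_letter_numbers generate_N_letter_numbers_alt
  set w : Int := max_length - (prefix_.toList.length : Int) with hw
  by_cases h : w > 0
  · rw [if_pos h, if_neg (by omega)]
    obtain ⟨r, hr⟩ : ∃ r, w.toNat = r + 1 := ⟨w.toNat - 1, by omega⟩
    rw [hr, ← map_suffixOf_range (r + 1), List.map_map]
    apply List.map_congr_left
    intro i hi
    have hi' : i < 10 ^ (r + 1) := List.mem_range.mp hi
    have hwi : w = (r : Int) + 1 := by omega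
    simp only [Function.comp]
    rw [hwi, zfill_toStr_eq_suffixOf r i hi']
  · rw [if_neg h, if_pos (by omega)]
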